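-- pv_equiv track=rewrite | github.com/AGodley/ThesisCode | code/displacedNullMeasurements/patterns.py | possible_patterns
-- ===== SOURCE A (Python) =====
-- import itertools
--
-- def possible_patterns(order):
--     result = []
--
--     # Finds all combinations of 0s and 1s up to order
--     for r in range(1, order+1):
--         combinations = itertools.product([0, 1], repeat=r)
--         # Result is a list of tuples containing the patterns
--         result.extend(combinations)
--
--     # Initializes the dictionary that will contain the patterns
--     dictionary = {}
--     # Adds first two patterns
--     dictionary['1'] = 0
--     dictionary['11'] = 0
--
--     # Converts each tuple into a string pattern, adds a 1 either side and adds it to a dictionary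
--     for tuple in result:
--         pat = '1'
--         for i in tuple:
--             pat += str(i)
--         pat += '1'
--         dictionary[pat] = 0
--     return dictionary
-- ===== SOURCE B (Python) =====
-- def possible_patterns(order):
--     # Arithmetic enumeration: the wanted keys are exactly the binary
--     # representations of the odd numbers below 2**(order+2), and counting the
--     # odd numbers upward visits them in exactly the original insertion order.
--     return {format(n, 'b'): 0 for n in range(1, 2 ** (max(order, 0) + 2), 2)}
-- ===== Notes on version B (the rewrite author's own statement) =====
-- stated objective: alternative
-- what changed: B drops the itertools.product enumeration and string assembly entirely: it counts the odd integers below 2**(order+2) and takes each one's binary representation as the key, since those are exactly the '1...1' patterns in A's insertion order.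
import Mathlib
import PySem

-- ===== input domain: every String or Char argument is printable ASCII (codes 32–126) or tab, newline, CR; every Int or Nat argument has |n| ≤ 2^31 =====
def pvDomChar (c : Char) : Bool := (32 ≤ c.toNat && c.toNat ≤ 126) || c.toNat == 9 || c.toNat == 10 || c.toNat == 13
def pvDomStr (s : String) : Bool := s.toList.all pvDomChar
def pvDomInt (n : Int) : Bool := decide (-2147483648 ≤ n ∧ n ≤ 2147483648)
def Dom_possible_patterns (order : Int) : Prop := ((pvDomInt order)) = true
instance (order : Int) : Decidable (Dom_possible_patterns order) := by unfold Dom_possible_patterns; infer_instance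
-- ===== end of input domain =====

-- B replaces A's per-length itertools.product enumeration and string assembly by counting
-- the odd integers below 2^(order+2) and using each one's binary representation as the key.

-- ===== PORT A =====
-- exact: itertools.product([0, 1], repeat=r) — all r-tuples over [0, 1],
-- rightmost coordinate varying fastest (lexicographic order)
def pvProdRep : Nat → List (List Int)
  | 0 => [[]]
  | n + 1 => (pvProdRep n).flatMap (fun t => [(0 : Int), 1].map (fun b => t ++ [b]))

def possible_patterns (order : Int) : List (String × Int) :=
  -- result = []; for r in range(1, order+1): result.extend(product([0,1], repeat=r))
  let result : List (List Int) :=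
    (PySem.List.pyRange 1 (order + 1) 1).foldl (fun acc r => acc ++ pvProdRep r.toNat) []
  -- dictionary = {}; dictionary['1'] = 0; dictionary['11'] = 0
  let dictionary : PySem.Dict String Int :=
    (PySem.Dict.empty.insert "1" 0).insert "11" 0
  -- for tuple in result: pat = '1'; for i in tuple: pat += str(i); pat += '1'; dictionary[pat] = 0
  let dictionary :=
    result.foldl (fun d t =>
      d.insert (String.ofList
        ((t.foldl (fun p i => p ++ PySem.Int.toChars i) ['1']) ++ ['1'])) 0) dictionary
  dictionary.items

-- ===== PORT B =====
-- {format(n, 'b'): 0 for n in range(1, 2 ** (max(order, 0) + 2), 2)}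
def possible_patterns_alt (order : Int) : List (String × Int) :=
  ((PySem.List.pyRange 1 ((2 : Int) ^ (max order 0 + 2).toNat) 2).foldl
      (fun d n => d.insert (PySem.Int.toBin n) 0)
      (PySem.Dict.empty : PySem.Dict String Int)).items

-- ===== PRECONDITION & SPEC =====
def Spec_possible_patterns (order : Int) (out : List (String × Int)) : Prop := out = possible_patterns_alt order
instance (order : Int) (out : List (String × Int)) : Decidable (Spec_possible_patterns order out) := by unfold Spec_possible_patterns; infer_instance

-- ===== CLAIM (what is proved, stated in full; the proofs are below) =====
def Claim_equal_possible_patterns : Prop := ∀ (order : Int), Dom_possible_patterns order → Spec_possible_patterns order (possible_patterns order)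

-- ===== LEMMAS AND PROOFS =====

-- binary digits of n (MSB first, as Python's format(n,'b') prints them)
def pvBits (n : Nat) : List Char :=
  if _h : n < 2 then [Nat.digitChar n]
  else pvBits (n / 2) ++ [Nat.digitChar (n % 2)]
decreasing_by exact Nat.div_lt_self (by omega) (by omega)

theorem pvBits_lt_two (n : Nat) (h : n < 2) : pvBits n = [Nat.digitChar n] := by
  conv_lhs => rw [pvBits]
  rw [dif_pos h]

theorem pvBits_two_le (n : Nat) (h : 2 ≤ n) :
    pvBits n = pvBits (n / 2) ++ [Nat.digitChar (n % 2)] := by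
  conv_lhs => rw [pvBits]
  rw [dif_neg (by omega)]

-- the k low-order bits of j, MSB first (j padded to width k)
def pvPad : Nat → Nat → List Char
  | 0, _ => []
  | k + 1, j => pvPad k (j / 2) ++ [Nat.digitChar (j % 2)]

-- fold a key list into the dict (value 0 each)
def pvIns (ks : List (List Char)) (d : PySem.Dict String Int) : PySem.Dict String Int :=
  ks.foldl (fun d k => d.insert (String.ofList k) 0) d

theorem pvToDigitsCore_eq : ∀ (f n : Nat) (l : List Char), n < f →
    Nat.toDigitsCore 2 f n l = pvBits n ++ l := by
  intro f
  induction f with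
  | zero => omega
  | succ f ih =>
    intro n l hn
    rw [Nat.toDigitsCore]
    by_cases h2 : n < 2
    · have h0 : n / 2 = 0 := by omega
      rw [h0, if_pos rfl, pvBits_lt_two n h2]
      rw [show n % 2 = n from by omega]
      rfl
    · have hne : ¬ n / 2 = 0 := by omega
      rw [if_neg hne, ih (n / 2) _ (by omega), pvBits_two_le n (by omega)]
      simp

theorem pvToDigits_eq (n : Nat) : Nat.toDigits 2 n = pvBits n := by
  rw [Nat.toDigits, pvToDigitsCore_eq (n + 1) n [] (Nat.lt_succ_self n), List.append_nil]

theorem pvBits_pow_add : ∀ (k j : Nat), j < 2 ^ k → pvBits (2 ^ k + j) = '1' :: pvPad k j := by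
  intro k
  induction k with
  | zero =>
    intro j hj
    interval_cases j
    rw [show (2 : Nat) ^ 0 + 0 = 1 from by norm_num, pvBits_lt_two 1 (by omega)]
    rfl
  | succ k ih =>
    intro j hj
    have hp : (2 : Nat) ≤ 2 ^ (k + 1) := Nat.one_lt_two_pow_iff.mpr (by omega)
    rw [pvBits_two_le _ (by omega)]
    have hdiv : (2 ^ (k + 1) + j) / 2 = 2 ^ k + j / 2 := by
      rw [pow_succ]; omega
    have hmod : (2 ^ (k + 1) + j) % 2 = j % 2 := by
      rw [pow_succ]; omega
    rw [hdiv, hmod, ih (j / 2) (by rw [pow_succ] at hj; omega), pvPad]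
    simp

-- binary of an odd number 2j+1 with j ≥ 1: binary of j followed by '1'
theorem pvBits_odd (j : Nat) (hj : 1 ≤ j) : pvBits (2 * j + 1) = pvBits j ++ ['1'] := by
  rw [pvBits_two_le _ (by omega), show (2 * j + 1) / 2 = j from by omega,
    show (2 * j + 1) % 2 = 1 from by omega]
  rfl

theorem pvRange_two_mul (n : Nat) :
    List.range (2 * n) = (List.range n).flatMap (fun j => [2 * j, 2 * j + 1]) := by
  induction n with
  | zero => rfl
  | succ n ih =>
    rw [show 2 * (n + 1) = 2 * n + 1 + 1 from by omega, List.range_succ, List.range_succ,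
      List.range_succ, ih]
    simp [List.flatMap_append]

-- A's level-r middle strings, in product order, are j ↦ pvPad r j for j < 2^r
theorem pvProdRep_pad (r : Nat) :
    (pvProdRep r).map (fun t => t.flatMap PySem.Int.toChars)
      = (List.range (2 ^ r)).map (pvPad r) := by
  induction r with
  | zero => rfl
  | succ r ih =>
    have hR : (List.range (2 ^ (r + 1))).map (pvPad (r + 1))
        = ((List.range (2 ^ r)).map (pvPad r)).flatMap (fun s => [s ++ ['0'], s ++ ['1']]) := by
      rw [pow_succ, Nat.mul_comm, pvRange_two_mul, List.map_flatMap, List.flatMap_map]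
      refine List.flatMap_congr (fun j _ => ?_)
      have e1 : 2 * j / 2 = j := by omega
      have e2 : 2 * j % 2 = 0 := by omega
      have e3 : (2 * j + 1) / 2 = j := by omega
      have e4 : (2 * j + 1) % 2 = 1 := by omega
      simp [pvPad, e1, e2, e3, e4]
      constructor <;> rfl
    have hL : (pvProdRep (r + 1)).map (fun t => t.flatMap PySem.Int.toChars)
        = ((pvProdRep r).map (fun t => t.flatMap PySem.Int.toChars)).flatMap
            (fun s => [s ++ ['0'], s ++ ['1']]) := by
      rw [pvProdRep, List.map_flatMap, List.flatMap_map]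
      refine List.flatMap_congr (fun t _ => ?_)
      simp [List.flatMap_append, show PySem.Int.toChars 0 = ['0'] from rfl,
        show PySem.Int.toChars 1 = ['1'] from rfl]
    rw [hL, hR, ih]

-- A's whole key sequence ('1', '11', then the levels) equals B's (binary of the odd numbers)
theorem pvKeys_eq (N : Nat) :
    (['1'] : List Char) :: (['1', '1'] : List Char) ::
        ((List.range N).flatMap (fun r =>
          (List.range (2 ^ (r + 1))).map (fun j => '1' :: (pvPad (r + 1) j ++ ['1']))))
      = (List.range (2 ^ (N + 1))).map (fun j => pvBits (2 * j + 1)) := by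
  induction N with
  | zero =>
    rw [show (2 : Nat) ^ (0 + 1) = 2 from rfl, List.range_succ, List.range_succ]
    simp [pvBits_lt_two 1 (by omega), pvBits_odd 1 (by omega)]
    rfl
  | succ N ih =>
    have hsplit : (2 : Nat) ^ (N + 1 + 1) = 2 ^ (N + 1) + 2 ^ (N + 1) := by ring
    conv_rhs => rw [hsplit, List.range_add, List.map_append, ← ih]
    rw [List.range_succ, List.flatMap_append]
    simp only [List.flatMap_cons, List.flatMap_nil, List.append_nil, List.cons_append,
      List.map_map]
    refine congrArg _ (congrArg _ (congrArg _ ?_))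
    refine (List.map_congr_left (fun i hi => ?_)).symm
    have hi' : i < 2 ^ (N + 1) := List.mem_range.mp hi
    have hone : (1 : Nat) ≤ 2 ^ (N + 1) := Nat.one_le_two_pow
    rw [Function.comp_apply, pvBits_odd (2 ^ (N + 1) + i) (by omega),
      pvBits_pow_add (N + 1) i hi']
    simp

theorem possible_patterns_eq (order : Int) :
    possible_patterns order = possible_patterns_alt order := by
  have hN : (max order 0 + 2).toNat = order.toNat + 2 := by omega
  set N := order.toNat with hNdef
  -- ---- reduce A's dictionary to pvIns over its key sequence ----
  rw [possible_patterns, possible_patterns_alt]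
  congr 1
  -- A side
  have hA : (PySem.List.pyRange 1 (order + 1) 1).foldl
        (fun acc r => acc ++ pvProdRep r.toNat) []
      = (List.range N).flatMap (fun k => pvProdRep (k + 1)) := by
    rw [PySem.List.pyRange_one, show (order + 1 - 1).toNat = N from by omega,
      PySem.List.foldl_append_eq_flatMap, List.nil_append, List.flatMap_map]
    refine List.flatMap_congr (fun k _ => ?_)
    rw [show ((1 : Int) + (k : Int)).toNat = k + 1 from by omega]
  rw [hA]
  have hkey : ∀ t : List Int,
      (t.foldl (fun p i => p ++ PySem.Int.toChars i) ['1']) ++ ['1']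
        = '1' :: (t.flatMap PySem.Int.toChars ++ ['1']) := by
    intro t
    rw [PySem.List.foldl_append_eq_flatMap]
    simp
  have hfoldA : ∀ (ts : List (List Int)) (d : PySem.Dict String Int),
      ts.foldl (fun d t => d.insert (String.ofList
          ((t.foldl (fun p i => p ++ PySem.Int.toChars i) ['1']) ++ ['1'])) 0) d
        = pvIns (ts.map (fun t => '1' :: (t.flatMap PySem.Int.toChars ++ ['1']))) d := by
    intro ts d
    rw [pvIns, List.foldl_map]
    have hfun : (fun (d : PySem.Dict String Int) (t : List Int) => d.insert (String.ofList
          ((t.foldl (fun p i => p ++ PySem.Int.toChars i) ['1']) ++ ['1'])) 0)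
        = fun d t => d.insert (String.ofList ('1' :: (t.flatMap PySem.Int.toChars ++ ['1']))) 0 := by
      funext d t
      rw [hkey t]
    rw [hfun]
  rw [hfoldA]
  have hd0 : ((PySem.Dict.empty.insert "1" 0).insert "11" (0 : Int))
      = pvIns [['1'], ['1', '1']] PySem.Dict.empty := rfl
  rw [hd0, show ∀ ks d, pvIns ks (pvIns [['1'], ['1', '1']] d) = pvIns ([['1'], ['1', '1']] ++ ks) d
      from fun ks d => (List.foldl_append).symm]
  have hmapA : ((List.range N).flatMap (fun k => pvProdRep (k + 1))).map
        (fun t => '1' :: (t.flatMap PySem.Int.toChars ++ ['1']))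
      = (List.range N).flatMap (fun r =>
          (List.range (2 ^ (r + 1))).map (fun j => '1' :: (pvPad (r + 1) j ++ ['1']))) := by
    rw [List.map_flatMap]
    refine List.flatMap_congr (fun r _ => ?_)
    rw [show (fun t : List Int => '1' :: (t.flatMap PySem.Int.toChars ++ ['1']))
          = (fun s => '1' :: (s ++ ['1'])) ∘ (fun t : List Int => t.flatMap PySem.Int.toChars)
        from rfl, ← List.map_map, pvProdRep_pad, List.map_map]
    rfl
  rw [hmapA, show ([['1'], ['1', '1']] : List (List Char)) ++ _ = _ from rfl]
  -- now: pvIns of A's key sequence; rewrite it via pvKeys_eq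
  have hconcat : ([['1'], ['1', '1']] : List (List Char)) ++
        ((List.range N).flatMap (fun r =>
          (List.range (2 ^ (r + 1))).map (fun j => '1' :: (pvPad (r + 1) j ++ ['1']))))
      = (List.range (2 ^ (N + 1))).map (fun j => pvBits (2 * j + 1)) := by
    rw [← pvKeys_eq N]
    rfl
  rw [hconcat]
  -- ---- reduce B's dictionary to the same pvIns ----
  rw [hN]
  have hMgt : (1 : Int) < (2 : Int) ^ (N + 2) := by
    have h4 : (1 : Nat) < 2 ^ (N + 2) := Nat.one_lt_two_pow_iff.mpr (by omega)
    exact_mod_cast h4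
  rw [PySem.List.pyRange_of_pos 1 ((2 : Int) ^ (N + 2)) (by norm_num : (0 : Int) < 2),
    if_pos hMgt,
    show ((2 : Int) ^ (N + 2) - 1 + 2 - 1) / 2 = ((2 ^ (N + 1) : Nat) : Int) from by
      rw [show ((2 : Int) ^ (N + 2) - 1 + 2 - 1) = 2 ^ (N + 1) * 2 from by ring,
        Int.mul_ediv_cancel _ (by norm_num)]
      push_cast
      ring,
    Int.toNat_natCast, List.foldl_map, pvIns, List.foldl_map]
  have hkeyB : (fun (d : PySem.Dict String Int) (k : Nat) =>
        d.insert (PySem.Int.toBin (1 + 2 * (k : Int))) 0)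
      = fun d k => d.insert (String.ofList (pvBits (2 * k + 1))) 0 := by
    funext d k
    have h1 : (1 + 2 * (k : Int)) = ((2 * k + 1 : Nat) : Int) := by push_cast; ring
    rw [h1, ← String.ofList_toList (s := PySem.Int.toBin ((2 * k + 1 : Nat) : Int)), PySem.Int.toList_toBin,
      show PySem.Int.toBinChars ((2 * k + 1 : Nat) : Int) = Nat.toDigits 2 (2 * k + 1) from by
        rw [PySem.Int.toBinChars, if_neg (by push_cast; omega), Int.toNat_natCast],
      pvToDigits_eq]
  rw [hkeyB]

-- ===== VERDICT (by name: the statement is the Claim_ definition above) =====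
theorem possible_patterns_spec : Claim_equal_possible_patterns := by
  intro order _
  exact possible_patterns_eq order
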